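-- pv_equiv track=rewrite | github.com/kostakazakoff/Python-Exercises-Basic-Course | decipher_this.py | decipher_message
-- ===== SOURCE A (Python) =====
-- def decipher_message(ciphered_string):
--     list_to_decipher = ciphered_string.split()
--     ascii_values = []
--     characters = []
--
--     for content in list_to_decipher:
--         # create a list with the extracted ASCII numbers (strings) from the strings in the source list:
--         ascii_values.append(''.join(list(filter(lambda x: str(x).isdigit(), content))))
--         # creating a list with the extracted alphabetic characters from the source list:
--         characters.append(list(filter(lambda x: str(x).isalpha(), content)))
--
--     # converting ASCII (strings) numbers to integers:
--     ascii_characters = list(map(lambda x: chr(int(x)), ascii_values))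
--
--     # prepare an empty list for the deciphered result:
--     deciphered = []
--
--     # rotate the first and last character places:
--     for i in range(len(characters)):
--         if len(characters[i]) > 0:
--             # create a temp copy of the last character of lists:
--             temp_char = characters[i][0]
--             # assign the value of last character to the first one:
--             characters[i][0] = characters[i][-1]
--             # assign value of temp (first character) to the last one:
--             characters[i][-1] = temp_char
--         # append to decipher a list of strings from the deciphered lists:
--         deciphered.append(ascii_characters[i] + ''.join(characters[i]))
--     # create a string from list:
--     deciphered = ' '.join(deciphered)
--     return deciphered
-- ===== SOURCE B (Python) =====
-- def decipher_message(ciphered_string):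
--     out = []
--     digits = []
--     letters = []
--     started = False
--     for c in ciphered_string + ' ':   # sentinel space flushes the final word
--         if c.isspace():
--             if started:
--                 word = chr(int(''.join(digits)))
--                 if len(letters) >= 2:
--                     word += letters[-1] + ''.join(letters[1:-1]) + letters[0]
--                 else:
--                     word += ''.join(letters)
--                 out.append(word)
--                 digits, letters, started = [], [], False
--         else:
--             started = True
--             if c.isdigit():
--                 digits.append(c)
--             if c.isalpha():
--                 letters.append(c)
--     return ' '.join(out)
-- ===== Notes on version B (the rewrite author's own statement) =====
-- stated objective: alternative
-- what changed: Replaces A's split()-then-parallel-lists staging (separate digit/letter extraction passes plus an index loop doing in-place first/last swaps) by a single character-level state machine over the raw string that accumulates the current word's digits and letters and flushes a decoded word (chr(int(digits)) + last+middle+first by slicing) at each whitespace boundary; split() is never called.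
import Mathlib
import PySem

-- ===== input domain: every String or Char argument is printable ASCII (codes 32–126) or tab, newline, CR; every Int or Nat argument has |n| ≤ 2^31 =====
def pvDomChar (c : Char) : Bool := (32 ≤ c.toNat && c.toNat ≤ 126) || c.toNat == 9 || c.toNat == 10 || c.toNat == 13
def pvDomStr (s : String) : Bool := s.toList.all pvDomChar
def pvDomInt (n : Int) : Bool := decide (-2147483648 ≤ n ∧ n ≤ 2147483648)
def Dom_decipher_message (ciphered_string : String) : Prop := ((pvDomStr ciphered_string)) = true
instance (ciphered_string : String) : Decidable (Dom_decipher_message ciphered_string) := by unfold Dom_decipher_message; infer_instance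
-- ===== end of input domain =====

-- B replaces A's split()+parallel-lists+index-loop staging by one character-level state machine with slice-based swap — alternative decomposition, same cost.

-- ===== PORT A =====
-- chr(n): exact for valid scalar values of n, which Pre_ guarantees
def decipher_message (ciphered_string : String) : String :=
  let list_to_decipher := PySem.Chars.split₀ ciphered_string.toList
  -- one loop appending to the two parallel lists ascii_values / characters
  let p := list_to_decipher.foldl
    (fun (acc : List (List Char) × List (List Char)) content =>
      (acc.1 ++ [content.filter PySem.Chars.isdigit],
       acc.2 ++ [content.filter PySem.Chars.isalpha])) ([], [])
  let ascii_values := p.1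
  let characters := p.2
  let ascii_characters := ascii_values.map (fun x =>
    match PySem.Int.ofChars? x with
    | some n => [Char.ofNat n.toNat]   -- chr(int(x)); Python raises on '' or invalid code point — outside Pre_
    | none => [])
  -- for i in range(len(characters)): swap first/last letter, append ascii_characters[i] + letters
  let deciphered := (List.range characters.length).foldl
    (fun acc i =>
      let cs := characters.getD i []
      let cs2 :=
        if cs.length > 0 then
          let temp_char := cs.headD ' '               -- characters[i][0]
          let cs1 := cs.set 0 (cs.getLastD ' ')       -- characters[i][0] = characters[i][-1]
          cs1.set (cs1.length - 1) temp_char          -- characters[i][-1] = temp_char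
        else cs
      acc ++ [ascii_characters.getD i [] ++ cs2]) []
  String.ofList (PySem.Chars.join [' '] deciphered)

-- ===== PORT B =====
-- one step of Source B's state machine: state = (out, digits, letters, started)
def pvStep (st : List (List Char) × List Char × List Char × Bool) (c : Char) :
    List (List Char) × List Char × List Char × Bool :=
  let (out, digits, letters, started) := st
  if PySem.Chars.isspace c then
    if started then
      let word :=
        (match PySem.Int.ofChars? digits with
         | some n => [Char.ofNat n.toNat]   -- chr(int(digits)); raising inputs are outside Pre_
         | none => []) ++
        (if letters.length ≥ 2 then
           -- letters[-1] + letters[1:-1] + letters[0]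
           [letters.getLastD ' '] ++ (letters.drop 1).dropLast ++ [letters.headD ' ']
         else letters)
      (out ++ [word], [], [], false)
    else st
  else
    (out,
     (if PySem.Chars.isdigit c then digits ++ [c] else digits),
     (if PySem.Chars.isalpha c then letters ++ [c] else letters),
     true)

def decipher_message_alt (ciphered_string : String) : String :=
  -- for c in ciphered_string + ' ': …  then ' '.join(out)
  String.ofList (PySem.Chars.join [' ']
    ((ciphered_string.toList ++ [' ']).foldl pvStep ([], [], [], false)).1)

-- ===== PRECONDITION & SPEC =====
-- Pre_ excludes exactly the words with no digit characters (int of an empty numeral raises ValueError) or whose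
-- digits name a code point chr rejects (> 0x10FFFF, ValueError) — A raises there — and, additionally, surrogate
-- code points 0xD800–0xDFFF, where Python's A returns a str that is not representable as a Lean String.
def Pre_decipher_message (ciphered_string : String) : Prop :=
  ∀ w ∈ PySem.Chars.split₀ ciphered_string.toList,
    w.filter PySem.Chars.isdigit ≠ [] ∧
    ((PySem.Int.ofChars? (w.filter PySem.Chars.isdigit)).getD 0).toNat.isValidChar
instance (ciphered_string : String) : Decidable (Pre_decipher_message ciphered_string) := by
  unfold Pre_decipher_message; infer_instance

def pvWitness_decipher_message : String := "65bc 72i"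

def Spec_decipher_message (ciphered_string : String) (out : String) : Prop := out = decipher_message_alt ciphered_string
instance (ciphered_string : String) (out : String) : Decidable (Spec_decipher_message ciphered_string out) := by unfold Spec_decipher_message; infer_instance

-- ===== CLAIM (what is proved, stated in full; the proofs are below) =====
def Claim_equal_decipher_message : Prop := ∀ (ciphered_string : String), Dom_decipher_message ciphered_string → Pre_decipher_message ciphered_string → Spec_decipher_message ciphered_string (decipher_message ciphered_string)

-- ===== LEMMAS AND PROOFS =====

-- per-word decoding, as B's flush performs it
def pvDec (w : List Char) : List Char :=
  (match PySem.Int.ofChars? (w.filter PySem.Chars.isdigit) with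
   | some n => [Char.ofNat n.toNat]
   | none => []) ++
  (let lt := w.filter PySem.Chars.isalpha
   if lt.length ≥ 2 then [lt.getLastD ' '] ++ (lt.drop 1).dropLast ++ [lt.headD ' ']
   else lt)

theorem pair_foldl_append {α β γ : Type} (f : α → β) (g : α → γ)
    (l : List α) (a : List β) (b : List γ) :
    l.foldl (fun acc c => (acc.1 ++ [f c], acc.2 ++ [g c])) (a, b)
      = (a ++ l.map f, b ++ l.map g) := by
  induction l generalizing a b with
  | nil => simp
  | cons x xs ih => simp [List.foldl_cons, ih]

theorem foldl_append_singleton {α β : Type} (f : α → List β)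
    (l : List α) (acc : List (List β)) :
    l.foldl (fun acc x => acc ++ [f x]) acc = acc ++ l.map f := by
  induction l generalizing acc with
  | nil => simp
  | cons x xs ih => simp [List.foldl_cons, ih]

-- set at the last index replaces the last element
theorem set_last {α : Type} (l : List α) (v : α) (h : l ≠ []) :
    l.set (l.length - 1) v = l.dropLast ++ [v] := by
  induction l with
  | nil => simp at h
  | cons x xs ih =>
    cases xs with
    | nil => simp
    | cons y ys =>
      have hih := ih (by simp)
      simp only [List.length_cons, Nat.add_sub_cancel] at hih ⊢
      simpa [List.set_cons_succ, List.dropLast_cons₂] using hih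

-- A's in-place first/last swap equals B's slice form
theorem swap_eq (lt : List Char) :
    (if lt.length > 0 then
       (lt.set 0 (lt.getLastD ' ')).set ((lt.set 0 (lt.getLastD ' ')).length - 1) (lt.headD ' ')
     else lt)
    = (if lt.length ≥ 2 then [lt.getLastD ' '] ++ (lt.drop 1).dropLast ++ [lt.headD ' ']
       else lt) := by
  match lt with
  | [] => simp
  | [x] => simp
  | x :: y :: rest =>
    have h2 : (x :: y :: rest).length > 0 := by simp
    have h3 : (x :: y :: rest).length ≥ 2 := by simp
    simp only [if_pos h2, if_pos h3]
    have hset : (x :: y :: rest).set 0 ((x :: y :: rest).getLastD ' ')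
        = (x :: y :: rest).getLastD ' ' :: y :: rest := by simp
    rw [hset]
    have hlen : ((x :: y :: rest).getLastD ' ' :: y :: rest).length - 1 = rest.length + 1 := by simp
    rw [hlen, List.set_cons_succ]
    rw [show (y :: rest).set rest.length ((x :: y :: rest).headD ' ')
          = (y :: rest).dropLast ++ [(x :: y :: rest).headD ' '] from by
        simpa using set_last (y :: rest) ((x :: y :: rest).headD ' ') (by simp)]
    simp

-- go with an accumulator = accumulated prefix ++ go with empty accumulator
theorem go_acc (l : List Char) (cur : List Char) (acc : List (List Char)) :
    PySem.Chars.split₀.go l cur acc = acc.reverse ++ PySem.Chars.split₀.go l cur [] := by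
  induction l generalizing cur acc with
  | nil =>
    by_cases h : cur.isEmpty <;> simp [PySem.Chars.split₀.go, h]
  | cons c rest ih =>
    by_cases hs : PySem.Chars.isspace c
    · by_cases he : cur.isEmpty
      · rw [show ∀ a, PySem.Chars.split₀.go (c :: rest) cur a = PySem.Chars.split₀.go rest [] a from
          fun a => by simp [PySem.Chars.split₀.go, hs, he]]
        rw [show ∀ a, PySem.Chars.split₀.go (c :: rest) cur a = PySem.Chars.split₀.go rest [] a from
          fun a => by simp [PySem.Chars.split₀.go, hs, he]]
        exact ih [] acc
      · rw [show ∀ a, PySem.Chars.split₀.go (c :: rest) cur a = PySem.Chars.split₀.go rest [] (cur.reverse :: a) from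
          fun a => by simp [PySem.Chars.split₀.go, hs, he]]
        rw [show ∀ a, PySem.Chars.split₀.go (c :: rest) cur a = PySem.Chars.split₀.go rest [] (cur.reverse :: a) from
          fun a => by simp [PySem.Chars.split₀.go, hs, he]]
        rw [ih [] (cur.reverse :: acc), ih [] [cur.reverse]]
        simp
    · rw [show ∀ a, PySem.Chars.split₀.go (c :: rest) cur a = PySem.Chars.split₀.go rest (c :: cur) a from
        fun a => by simp [PySem.Chars.split₀.go, hs]]
      rw [show ∀ a, PySem.Chars.split₀.go (c :: rest) cur a = PySem.Chars.split₀.go rest (c :: cur) a from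
        fun a => by simp [PySem.Chars.split₀.go, hs]]
      exact ih (c :: cur) acc

-- the state machine over (l ++ [' ']) produces the decoded words of split₀
theorem fold_go (l : List Char) (cur : List Char) (out : List (List Char)) :
    (l ++ [' ']).foldl pvStep
      (out, cur.reverse.filter PySem.Chars.isdigit, cur.reverse.filter PySem.Chars.isalpha, !cur.isEmpty)
    = (out ++ (PySem.Chars.split₀.go l cur []).map pvDec, [], [], false) := by
  induction l generalizing cur out with
  | nil =>
    by_cases he : cur.isEmpty
    · have hc : cur = [] := List.isEmpty_iff.mp he
      subst hc
      simp [pvStep, PySem.Chars.split₀.go, PySem.Chars.isspace]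
    · simp only [List.nil_append, List.foldl_cons, List.foldl_nil]
      rw [show PySem.Chars.split₀.go [] cur [] = [cur.reverse] from by
        simp [PySem.Chars.split₀.go, he]]
      simp only [pvStep, he, Bool.not_false]
      simp [PySem.Chars.isspace, pvDec]
  | cons c rest ih =>
    simp only [List.cons_append, List.foldl_cons]
    by_cases hs : PySem.Chars.isspace c
    · by_cases he : cur.isEmpty
      · have hc : cur = [] := List.isEmpty_iff.mp he
        subst hc
        rw [show PySem.Chars.split₀.go (c :: rest) [] [] = PySem.Chars.split₀.go rest [] [] from by
          simp [PySem.Chars.split₀.go, hs]]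
        have := ih [] out
        simp only [List.reverse_nil, List.filter_nil, List.isEmpty_nil, Bool.not_true] at this ⊢
        rw [show pvStep (out, [], [], false) c = (out, [], [], false) from by
          simp [pvStep, hs]]
        exact this
      · rw [show PySem.Chars.split₀.go (c :: rest) cur [] = cur.reverse :: PySem.Chars.split₀.go rest [] [] from by
          rw [show PySem.Chars.split₀.go (c :: rest) cur [] = PySem.Chars.split₀.go rest [] [cur.reverse] from by
            simp [PySem.Chars.split₀.go, hs, he]]
          simpa using go_acc rest [] [cur.reverse]]
        rw [show pvStep (out, cur.reverse.filter PySem.Chars.isdigit, cur.reverse.filter PySem.Chars.isalpha, !cur.isEmpty) c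
              = (out ++ [pvDec cur.reverse], [], [], false) from by
          simp [pvStep, hs, he, pvDec]]
        have := ih [] (out ++ [pvDec cur.reverse])
        simp only [List.reverse_nil, List.filter_nil, List.isEmpty_nil, Bool.not_true] at this
        rw [this]
        simp
    · rw [show PySem.Chars.split₀.go (c :: rest) cur [] = PySem.Chars.split₀.go rest (c :: cur) [] from by
        simp [PySem.Chars.split₀.go, hs]]
      rw [show pvStep (out, cur.reverse.filter PySem.Chars.isdigit, cur.reverse.filter PySem.Chars.isalpha, !cur.isEmpty) c
            = (out, (c :: cur).reverse.filter PySem.Chars.isdigit, (c :: cur).reverse.filter PySem.Chars.isalpha, !(c :: cur).isEmpty) from by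
        simp only [pvStep, hs, List.reverse_cons, List.filter_append, List.isEmpty_cons,
          Bool.not_false]
        refine Prod.ext rfl (Prod.ext ?_ (Prod.ext ?_ rfl)) <;>
          (simp; split_ifs with h <;> simp [List.filter, h])]
      exact ih (c :: cur) out

theorem decipher_message_eq (s : String) :
    decipher_message s = decipher_message_alt s := by
  unfold decipher_message decipher_message_alt
  have hB : ((s.toList ++ [' ']).foldl pvStep ([], [], [], false)).1
      = (PySem.Chars.split₀ s.toList).map pvDec := by
    have := fold_go s.toList [] []
    simp only [List.reverse_nil, List.filter_nil, List.isEmpty_nil, Bool.not_true] at this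
    rw [PySem.Chars.split₀]
    simp [this]
  rw [hB]
  simp only [pair_foldl_append, List.nil_append, foldl_append_singleton]
  congr 1
  congr 1
  apply List.ext_getElem
  · simp
  · intro i h1 h2
    simp only [List.length_map, List.length_range] at h1
    simp only [List.getElem_map, List.getElem_range]
    rw [List.getD_eq_getElem _ _ (by simpa using h1), List.getD_eq_getElem _ _ (by simpa using h1)]
    simp only [List.getElem_map]
    set w := (PySem.Chars.split₀ s.toList)[i] with hw
    simp only [pvDec]
    congr 1
    exact swap_eq (w.filter PySem.Chars.isalpha)

-- ===== VERDICT (by name: the statement is the Claim_ definition above) =====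
theorem decipher_message_spec : Claim_equal_decipher_message := by
  intro s _ _
  unfold Spec_decipher_message
  exact decipher_message_eq s
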